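-- pv_equiv track=rewrite | github.com/Hugoved/pybbts | pybbts.py | dolby_rpu_rbsp_positions_from_ebsp
-- ===== SOURCE A (Python) =====
-- def dolby_rpu_rbsp_positions_from_ebsp(ebsp):
--     positions = []
--     zeros = 0
--     for index, value in enumerate(ebsp):
--         if zeros == 2 and value == 0x03:
--             zeros = 0
--             continue
--         positions.append(index)
--         if value == 0x00:
--             zeros += 1
--             if zeros > 2:
--                 zeros = 2
--         else:
--             zeros = 0
--     return positions
-- ===== SOURCE B (Python) =====
-- def dolby_rpu_rbsp_positions_from_ebsp(ebsp):
--     seq = list(ebsp)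
--     return [i for i in range(len(seq))
--             if not (i >= 2 and seq[i] == 0x03 and seq[i - 1] == 0x00 and seq[i - 2] == 0x00)]
-- ===== Notes on version B (the rewrite author's own statement) =====
-- stated objective: simpler
-- what changed: Replaced A's stateful run-of-zeros counter with continue/reset logic by a stateless comprehension over range(len(seq)) that drops index i exactly when seq[i]==0x03 and the two preceding bytes are 0x00.
import Mathlib
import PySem

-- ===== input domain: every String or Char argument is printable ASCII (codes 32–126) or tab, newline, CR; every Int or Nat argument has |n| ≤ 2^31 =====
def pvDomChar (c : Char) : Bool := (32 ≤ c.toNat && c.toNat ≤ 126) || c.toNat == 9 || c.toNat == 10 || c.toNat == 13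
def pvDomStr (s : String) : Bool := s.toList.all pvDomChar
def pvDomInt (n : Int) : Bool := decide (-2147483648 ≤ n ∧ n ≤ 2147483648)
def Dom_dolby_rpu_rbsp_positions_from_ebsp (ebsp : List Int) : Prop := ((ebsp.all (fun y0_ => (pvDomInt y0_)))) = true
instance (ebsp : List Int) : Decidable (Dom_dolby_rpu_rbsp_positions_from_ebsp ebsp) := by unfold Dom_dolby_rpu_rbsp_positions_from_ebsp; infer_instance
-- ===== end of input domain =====

-- B replaces A's carried `zeros` run-counter by a stateless two-byte lookback predicate over
-- range(len(ebsp)) (objective: simpler).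

-- ===== PORT A =====
def dolby_rpu_rbsp_positions_from_ebsp (ebsp : List Int) : List Int :=
  ((PySem.List.enumerate ebsp 0).foldl
    (fun (st : List Int × Int) iv =>
      let positions := st.1
      let zeros := st.2
      let index := iv.1
      let value := iv.2
      if zeros = 2 ∧ value = 3 then (positions, 0)
      else
        let positions := positions ++ [index]
        let zeros := if value = 0 then (if zeros + 1 > 2 then 2 else zeros + 1) else (0 : Int)
        (positions, zeros))
    ([], 0)).1

-- ===== PORT B =====
def dolby_rpu_rbsp_positions_from_ebsp_alt (ebsp : List Int) : List Int :=
  (PySem.List.pyRange 0 (ebsp.length : Int) 1).filter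
    (fun i =>
      !(decide (2 ≤ i) && decide (PySem.List.pyGetD ebsp i 0 = 3)
        && decide (PySem.List.pyGetD ebsp (i - 1) 0 = 0)
        && decide (PySem.List.pyGetD ebsp (i - 2) 0 = 0)))

-- ===== PRECONDITION & SPEC =====
def Spec_dolby_rpu_rbsp_positions_from_ebsp (ebsp : List Int) (out : List Int) : Prop := out = dolby_rpu_rbsp_positions_from_ebsp_alt ebsp
instance (ebsp : List Int) (out : List Int) : Decidable (Spec_dolby_rpu_rbsp_positions_from_ebsp ebsp out) := by unfold Spec_dolby_rpu_rbsp_positions_from_ebsp; infer_instance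

-- ===== CLAIM (what is proved, stated in full; the proofs are below) =====
def Claim_equal_dolby_rpu_rbsp_positions_from_ebsp : Prop := ∀ (ebsp : List Int), Dom_dolby_rpu_rbsp_positions_from_ebsp ebsp → Spec_dolby_rpu_rbsp_positions_from_ebsp ebsp (dolby_rpu_rbsp_positions_from_ebsp ebsp)

-- ===== LEMMAS AND PROOFS =====

-- Common recursive specification: walk the list carrying the two preceding bytes.
def pvSpecG : List Int → Option Int → Option Int → Int → List Int
  | [], _, _, _ => []
  | v :: rest, p2, p1, i =>
    if p2 = some 0 ∧ p1 = some 0 ∧ v = 3 then pvSpecG rest p1 (some v) (i + 1)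
    else i :: pvSpecG rest p1 (some v) (i + 1)

-- A's zeros counter as a function of the two preceding bytes.
def pvZOf (p2 p1 : Option Int) : Int :=
  if p1 = some 0 then (if p2 = some 0 then 2 else 1) else 0

-- A's loop step, named for the proofs (identical to the lambda in the port).
def pvStepA (st : List Int × Int) (iv : Int × Int) : List Int × Int :=
  let positions := st.1
  let zeros := st.2
  let index := iv.1
  let value := iv.2
  if zeros = 2 ∧ value = 3 then (positions, 0)
  else
    let positions := positions ++ [index]
    let zeros := if value = 0 then (if zeros + 1 > 2 then 2 else zeros + 1) else (0 : Int)
    (positions, zeros)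

theorem pvFoldA_acc (l : List (Int × Int)) (acc : List Int) (z : Int) :
    (l.foldl pvStepA (acc, z)).1 = acc ++ (l.foldl pvStepA ([], z)).1 := by
  induction l generalizing acc z with
  | nil => simp
  | cons iv rest ih =>
    simp only [List.foldl_cons]
    by_cases h : z = 2 ∧ iv.2 = 3
    · simp only [pvStepA, if_pos h]
      exact ih acc 0
    · simp only [pvStepA, if_neg h, List.nil_append]
      rw [ih (acc ++ [iv.1]), ih [iv.1]]
      simp

theorem pvStepA_skip (p2 p1 : Option Int) (s v : Int) (h : p2 = some 0 ∧ p1 = some 0 ∧ v = 3) :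
    pvStepA ([], pvZOf p2 p1) (s, v) = ([], pvZOf p1 (some v)) := by
  obtain ⟨h2, h1, hv⟩ := h
  subst h2 h1 hv
  simp [pvStepA, pvZOf]

theorem pvStepA_keep (p2 p1 : Option Int) (s v : Int) (h : ¬ (p2 = some 0 ∧ p1 = some 0 ∧ v = 3)) :
    pvStepA ([], pvZOf p2 p1) (s, v) = ([s], pvZOf p1 (some v)) := by
  unfold pvStepA pvZOf
  by_cases hv0 : v = 0 <;> by_cases hv3 : v = 3 <;>
    by_cases ha : p1 = some 0 <;> by_cases hb : p2 = some 0 <;>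
    simp_all

theorem pvFoldA_eq_specG (l : List Int) (p2 p1 : Option Int) (s : Int) :
    ((PySem.List.enumerate l s).foldl pvStepA ([], pvZOf p2 p1)).1 = pvSpecG l p2 p1 s := by
  induction l generalizing p2 p1 s with
  | nil => simp [PySem.List.enumerate_nil, pvSpecG]
  | cons v rest ih =>
    rw [PySem.List.enumerate_cons, List.foldl_cons]
    by_cases h : p2 = some 0 ∧ p1 = some 0 ∧ v = 3
    · rw [pvStepA_skip p2 p1 s v h, ih, pvSpecG, if_pos h]
    · rw [pvStepA_keep p2 p1 s v h, pvFoldA_acc, ih, pvSpecG, if_neg h]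
      simp

-- B's filter predicate, named for the proofs (identical to the lambda in the port).
def pvPredB (xs : List Int) (i : Int) : Bool :=
  !(decide (2 ≤ i) && decide (PySem.List.pyGetD xs i 0 = 3)
    && decide (PySem.List.pyGetD xs (i - 1) 0 = 0)
    && decide (PySem.List.pyGetD xs (i - 2) 0 = 0))

theorem pvGetD_append_len (pre l : List Int) (v : Int) :
    PySem.List.pyGetD (pre ++ v :: l) ((pre.length : Int)) 0 = v := by
  rw [show ((pre.length : Int)) = ((pre.length : Nat) : Int) from rfl, PySem.List.pyGetD_natCast]
  simp [List.getD_eq_getElem?_getD]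

theorem pvFilterB_eq_specG (l : List Int) (pre : List Int) (p2 p1 : Option Int)
    (h1 : p1 = if 1 ≤ pre.length then some (PySem.List.pyGetD (pre ++ l) ((pre.length : Int) - 1) 0) else none)
    (h2 : p2 = if 2 ≤ pre.length then some (PySem.List.pyGetD (pre ++ l) ((pre.length : Int) - 2) 0) else none) :
    (PySem.List.pyRange (pre.length : Int) ((pre ++ l).length : Int) 1).filter (pvPredB (pre ++ l))
      = pvSpecG l p2 p1 (pre.length : Int) := by
  induction l generalizing pre p2 p1 with
  | nil => simp [PySem.List.pyRange_one_eq_nil, pvSpecG]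
  | cons v rest ih =>
    have hlen : ((pre.length : Int)) < ((pre ++ v :: rest).length : Int) := by
      simp
    rw [PySem.List.pyRange_one_cons hlen, List.filter_cons]
    have hv : PySem.List.pyGetD (pre ++ v :: rest) ((pre.length : Int)) 0 = v :=
      pvGetD_append_len pre rest v
    -- the keep/skip decision agrees with the spec's condition
    have hcond : (pvPredB (pre ++ v :: rest) (pre.length : Int) = false)
        ↔ (p2 = some 0 ∧ p1 = some 0 ∧ v = 3) := by
      unfold pvPredB
      by_cases hge : 2 ≤ pre.length
      · have hgei : (2 : Int) ≤ (pre.length : Int) := by exact_mod_cast hge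
        have hge1 : 1 ≤ pre.length := by omega
        rw [h1, h2]
        simp [hge, hge1, hgei, hv]
        tauto
      · have hgei : ¬ (2 : Int) ≤ (pre.length : Int) := by exact_mod_cast hge
        have hp2 : p2 = none := by rw [h2]; simp [hge]
        simp [hgei, hp2]
    -- re-express the tail with pre' = pre ++ [v]
    have hre : pre ++ v :: rest = (pre ++ [v]) ++ rest := by simp
    have h1' : some v = (if 1 ≤ (pre ++ [v]).length then some (PySem.List.pyGetD ((pre ++ [v]) ++ rest) (((pre ++ [v]).length : Int) - 1) 0) else none) := by
      have he : (((pre ++ [v]).length : Int) - 1) = (pre.length : Int) := by simp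
      rw [if_pos (by simp), he, ← hre, hv]
    have h2' : p1 = (if 2 ≤ (pre ++ [v]).length then some (PySem.List.pyGetD ((pre ++ [v]) ++ rest) (((pre ++ [v]).length : Int) - 2) 0) else none) := by
      by_cases hp : 1 ≤ pre.length
      · have he : (((pre ++ [v]).length : Int) - 2) = (pre.length : Int) - 1 := by
          simp; ring
        rw [if_pos (by simp; omega), he, ← hre, h1, if_pos hp]
      · have hpre : pre = [] := by
          cases pre with
          | nil => rfl
          | cons a t => simp at hp
        rw [h1, hpre]
        simp
    have htail := ih (pre ++ [v]) p1 (some v) h1' h2'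
    rw [← hre] at htail
    rw [show (((pre ++ [v]).length : Int)) = (pre.length : Int) + 1 by simp] at htail
    by_cases h : p2 = some 0 ∧ p1 = some 0 ∧ v = 3
    · rw [if_neg (by simp [hcond.mpr h])]
      simp only [pvSpecG]
      rw [if_pos h]
      exact htail
    · have hkeep : pvPredB (pre ++ v :: rest) (pre.length : Int) = true := by
        cases hb : pvPredB (pre ++ v :: rest) (pre.length : Int) with
        | false => exact absurd (hcond.mp hb) h
        | true => rfl
      rw [if_pos hkeep]
      simp only [pvSpecG]
      rw [if_neg h]
      exact congrArg (List.cons (pre.length : Int)) htail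

-- ===== VERDICT (by name: the statement is the Claim_ definition above) =====
theorem dolby_rpu_rbsp_positions_from_ebsp_spec : Claim_equal_dolby_rpu_rbsp_positions_from_ebsp := by
  intro ebsp _
  show dolby_rpu_rbsp_positions_from_ebsp ebsp = dolby_rpu_rbsp_positions_from_ebsp_alt ebsp
  have eA : dolby_rpu_rbsp_positions_from_ebsp ebsp
      = ((PySem.List.enumerate ebsp 0).foldl pvStepA ([], 0)).1 := rfl
  have eB : dolby_rpu_rbsp_positions_from_ebsp_alt ebsp
      = (PySem.List.pyRange 0 (ebsp.length : Int) 1).filter (pvPredB ebsp) := rfl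
  have hA := pvFoldA_eq_specG ebsp none none 0
  rw [show pvZOf none none = (0 : Int) from rfl] at hA
  have hB := pvFilterB_eq_specG ebsp [] none none (by simp) (by simp)
  simp only [List.nil_append, List.length_nil, Nat.cast_zero] at hB
  rw [eA, eB, hA, hB]
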